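-- pv_equiv track=rewrite | github.com/thinguyend/learn-bayes | fanned_garden_svg.py | get_2nd_layer_degs
-- ===== SOURCE A (Python) =====
-- d = 180
--
-- def get_2nd_layer_degs(deg=d):
--     list_of_degs = []
--     x, y, z = 9, 16, 12
--     deg = deg - z
--     for j in range(4):
--         list_of_degs.append(deg)
--         for i in range(3):
--             deg -= x
--             list_of_degs.append(deg)
--         deg -= y
--     return list_of_degs
-- ===== SOURCE B (Python) =====
-- d = 180
--
-- def get_2nd_layer_degs(deg=d):
--     # closed form: element n (0..15) is deg - 12 - 43*(n//4) - 9*(n%4)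
--     return [deg - 12 - 43 * (n // 4) - 9 * (n % 4) for n in range(16)]
-- ===== Notes on version B (the rewrite author's own statement) =====
-- stated objective: simpler
-- what changed: Replaces the nested loops with a running accumulator by a single flat comprehension computing each element from its index via the closed form deg - 12 - 43*(n//4) - 9*(n%4).
import Mathlib
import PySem

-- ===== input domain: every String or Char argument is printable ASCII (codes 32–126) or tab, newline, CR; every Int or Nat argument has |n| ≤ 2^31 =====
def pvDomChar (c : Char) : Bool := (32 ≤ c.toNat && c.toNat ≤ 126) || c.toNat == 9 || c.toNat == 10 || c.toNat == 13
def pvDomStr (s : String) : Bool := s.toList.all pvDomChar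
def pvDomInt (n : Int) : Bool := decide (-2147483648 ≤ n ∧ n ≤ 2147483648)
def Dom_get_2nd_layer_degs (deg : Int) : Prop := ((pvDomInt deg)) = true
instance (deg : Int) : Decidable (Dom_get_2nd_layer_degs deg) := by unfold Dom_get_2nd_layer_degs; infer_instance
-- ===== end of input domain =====

-- B replaces A's nested loops and running accumulator by a closed-form formula per index (simpler).

-- ===== PORT A =====
-- literal transliteration: nested folds over range(4)/range(3) carrying (list_of_degs, deg)
def get_2nd_layer_degs (deg : Int) : List Int :=
  let z : Int := 12
  let x : Int := 9
  let y : Int := 16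
  let deg0 := deg - z
  let st := (PySem.List.pyRange 0 4 1).foldl
    (fun (s : List Int × Int) _ =>
      let s := (s.1 ++ [s.2], s.2)
      let s := (PySem.List.pyRange 0 3 1).foldl
        (fun (t : List Int × Int) _ =>
          let d := t.2 - x
          (t.1 ++ [d], d)) s
      (s.1, s.2 - y))
    (([] : List Int), deg0)
  st.1

-- ===== PORT B =====
-- closed form: element n of range(16) is deg - 12 - 43*(n//4) - 9*(n%4)
def get_2nd_layer_degs_alt (deg : Int) : List Int :=
  (PySem.List.pyRange 0 16 1).map
    (fun n => deg - 12 - 43 * (PySem.Int.floordiv n 4) - 9 * (PySem.Int.mod n 4))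

-- ===== PRECONDITION & SPEC =====
def Spec_get_2nd_layer_degs (deg : Int) (out : List Int) : Prop := out = get_2nd_layer_degs_alt deg
instance (deg : Int) (out : List Int) : Decidable (Spec_get_2nd_layer_degs deg out) := by unfold Spec_get_2nd_layer_degs; infer_instance

-- ===== CLAIM (what is proved, stated in full; the proofs are below) =====
def Claim_equal_get_2nd_layer_degs : Prop := ∀ (deg : Int), Dom_get_2nd_layer_degs deg → Spec_get_2nd_layer_degs deg (get_2nd_layer_degs deg)

-- ===== LEMMAS AND PROOFS =====

-- ===== VERDICT (by name: the statement is the Claim_ definition above) =====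
theorem get_2nd_layer_degs_spec : Claim_equal_get_2nd_layer_degs := by
  intro deg _
  show get_2nd_layer_degs deg = get_2nd_layer_degs_alt deg
  have h3 : List.range 3 = [0,1,2] := by decide
  have h4 : List.range 4 = [0,1,2,3] := by decide
  have h16 : List.range 16 = [0,1,2,3,4,5,6,7,8,9,10,11,12,13,14,15] := by decide
  simp only [get_2nd_layer_degs, get_2nd_layer_degs_alt, PySem.List.pyRange, Int.toNat]
  norm_num [h3, h4, h16, PySem.Int.floordiv, PySem.Int.mod, Int.fdiv, Int.fmod]
  omega
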